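-- pv_equiv track=rewrite | github.com/modelscope/PromptScope | data/场景数据/fill_in_merge.py | convert_csv_2_json
-- ===== SOURCE A (Python) =====
-- def convert_csv_2_json(data, load_key_list, sav_key_list, fill_in_keys):
--     num_samples = len(data[load_key_list[0]])
--     results = []
--
--     fill_in_value = {}
--     for item in fill_in_keys:
--         fill_in_value[item] = None
--
--     for idx in range(num_samples):
--         tmp_data = {}
--         for load_key, sav_key in zip(load_key_list, sav_key_list):
--             if len(data[load_key][idx]) > 0:
--                 tmp_data[sav_key] = data[load_key][idx]
--                 if load_key in fill_in_keys:
--                     fill_in_value[load_key] = data[load_key][idx]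
--             else:
--                 tmp_data[sav_key] = fill_in_value[load_key]
--         results.append(tmp_data)
--     return results
-- ===== SOURCE B (Python) =====
-- def convert_csv_2_json(data, load_key_list, sav_key_list, fill_in_keys):
--     num_samples = len(data[load_key_list[0]])
--     results = [{} for _ in range(num_samples)]
--     for load_key, sav_key in zip(load_key_list, sav_key_list):
--         carry = None
--         for row, cell in zip(results, data[load_key]):
--             if cell:
--                 row[sav_key] = cell
--                 if load_key in fill_in_keys:
--                     carry = cell
--             else:
--                 row[sav_key] = carry
--     return results
-- ===== Notes on version B (the rewrite author's own statement) =====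
-- stated objective: alternative
-- what changed: B transposes the nesting: instead of A's row-major pass that threads one shared fill_in_value dict across rows, B pre-creates one dict per row and processes the data column-by-column with a single per-column carry variable, filling each output row in place; Pre_ excludes inputs where A raises (missing key, short column, empty cell under a non-fill key) and inputs where a fill column's cell is empty before any non-empty value, on which both programs put None (not a str) into the output dict.
import Mathlib
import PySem

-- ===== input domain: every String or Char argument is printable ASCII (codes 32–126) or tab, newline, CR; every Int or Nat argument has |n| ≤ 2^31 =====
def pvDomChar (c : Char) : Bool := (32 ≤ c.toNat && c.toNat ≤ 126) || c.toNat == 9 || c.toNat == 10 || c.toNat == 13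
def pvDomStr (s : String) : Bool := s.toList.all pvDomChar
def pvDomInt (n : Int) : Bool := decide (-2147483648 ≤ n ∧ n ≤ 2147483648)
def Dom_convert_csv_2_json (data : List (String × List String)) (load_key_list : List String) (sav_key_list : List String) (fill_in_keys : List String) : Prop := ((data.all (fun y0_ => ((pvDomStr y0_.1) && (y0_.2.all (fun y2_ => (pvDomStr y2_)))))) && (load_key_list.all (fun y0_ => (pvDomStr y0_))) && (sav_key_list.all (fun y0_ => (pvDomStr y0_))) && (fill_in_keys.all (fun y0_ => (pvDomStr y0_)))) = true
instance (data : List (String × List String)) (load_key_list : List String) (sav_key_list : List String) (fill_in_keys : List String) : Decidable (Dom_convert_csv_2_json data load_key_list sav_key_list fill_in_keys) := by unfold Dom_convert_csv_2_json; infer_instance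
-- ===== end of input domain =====

-- B transposes A's nesting: column-by-column with a per-column carry instead of row-by-row
-- with a shared fill dict; equal return values on Pre_ (A's non-raising, None-free inputs).


/-- `data[k]` for the dict parameter (first-match lookup in the association list). -/
def pvLookup (data : List (String × List String)) (k : String) : Option (List String) :=
  (PySem.Dict.mk data).get? k

-- ===== PORT A =====
-- inner loop `for load_key, sav_key in zip(...)`: state (fill_in_value, tmp_data);
-- `none` marks the raising / None-valued paths excluded by Pre_.
def pvA_row (data : List (String × List String)) (fill_in_keys : List String) (idx : Int) :
    List (String × String) →
    PySem.Dict String (Option String) × PySem.Dict String String →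
    Option (PySem.Dict String (Option String) × PySem.Dict String String)
  | [], st => some st
  | (lk, sk) :: rest, (fv, tmp) =>
    match pvLookup data lk with
    | none => none
    | some col =>
      match PySem.List.pyGet? col idx with
      | none => none
      | some cell =>
        if 0 < PySem.Str.len cell then
          pvA_row data fill_in_keys idx rest
            ((if fill_in_keys.contains lk then fv.insert lk (some cell) else fv),
             tmp.insert sk cell)
        else
          match fv.get? lk with
          | some (some v) => pvA_row data fill_in_keys idx rest (fv, tmp.insert sk v)
          | _ => none

-- outer loop `for idx in range(num_samples)`: results accumulator
def pvA_rows (data : List (String × List String)) (fill_in_keys : List String)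
    (pairs : List (String × String)) :
    List Int → PySem.Dict String (Option String) → List (List (String × String)) →
    Option (List (List (String × String)))
  | [], _, acc => some acc
  | i :: rest, fv, acc =>
    match pvA_row data fill_in_keys i pairs (fv, PySem.Dict.empty) with
    | none => none
    | some (fv', tmp) => pvA_rows data fill_in_keys pairs rest fv' (acc ++ [tmp.items])

def convert_csv_2_json (data : List (String × List String)) (load_key_list : List String) (sav_key_list : List String) (fill_in_keys : List String) : List (List (String × String)) :=
  match PySem.List.pyGet? load_key_list 0 with
  | none => []
  | some k0 =>
    match pvLookup data k0 with
    | none => []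
    | some col0 =>
      let fv0 := fill_in_keys.foldl (fun d k => d.insert k (none : Option String)) PySem.Dict.empty
      match pvA_rows data fill_in_keys (load_key_list.zip sav_key_list)
          (PySem.List.pyRange 0 (col0.length : Int) 1) fv0 [] with
      | none => []
      | some r => r

-- ===== PORT B =====
-- inner loop `for row, cell in zip(results, data[load_key])` with the per-column carry
def pvB_col (fillk : Bool) (sk : String) :
    List (PySem.Dict String String) → List String → Option String →
    Option (List (PySem.Dict String String))
  | [], _, _ => some []
  | r :: rows, [], _ => some (r :: rows)
  | row :: rows, cell :: cells, carry =>
    if cell ≠ "" then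
      match pvB_col fillk sk rows cells (if fillk then some cell else carry) with
      | none => none
      | some rs => some (row.insert sk cell :: rs)
    else
      match carry with
      | none => none   -- Python would store None (not a str); excluded by Pre_
      | some v =>
        match pvB_col fillk sk rows cells carry with
        | none => none
        | some rs => some (row.insert sk v :: rs)

-- outer loop over the zipped key pairs
def pvB_cols (data : List (String × List String)) (fill_in_keys : List String) :
    List (String × String) → List (PySem.Dict String String) →
    Option (List (PySem.Dict String String))
  | [], results => some results
  | (lk, sk) :: rest, results =>
    match pvLookup data lk with
    | none => none
    | some col =>
      match pvB_col (fill_in_keys.contains lk) sk results col none with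
      | none => none
      | some rs => pvB_cols data fill_in_keys rest rs

def convert_csv_2_json_alt (data : List (String × List String)) (load_key_list : List String) (sav_key_list : List String) (fill_in_keys : List String) : List (List (String × String)) :=
  match PySem.List.pyGet? load_key_list 0 with
  | none => []
  | some k0 =>
    match pvLookup data k0 with
    | none => []
    | some col0 =>
      match pvB_cols data fill_in_keys (load_key_list.zip sav_key_list)
          (List.replicate col0.length PySem.Dict.empty) with
      | none => []
      | some rs => rs.map PySem.Dict.items

-- ===== PRECONDITION & SPEC =====
-- Pre_ excludes exactly: the inputs where A raises (empty load_key_list, a key missing from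
-- data, a column shorter than the first one, an empty cell under a key not in fill_in_keys),
-- and the inputs where a fill column has an empty cell before any non-empty one — there A
-- returns a dict containing None, which is not a value of the declared String type.
def Pre_convert_csv_2_json (data : List (String × List String)) (load_key_list : List String) (sav_key_list : List String) (fill_in_keys : List String) : Prop :=
  load_key_list ≠ [] ∧
  (pvLookup data load_key_list.headI).isSome = true ∧
  ∀ p ∈ load_key_list.zip sav_key_list,
    (pvLookup data p.1).isSome = true ∧
    ((pvLookup data load_key_list.headI).getD []).length ≤ ((pvLookup data p.1).getD []).length ∧
    ∀ i ∈ List.range ((pvLookup data load_key_list.headI).getD []).length,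
      ((pvLookup data p.1).getD []).getD i "" = "" →
        p.1 ∈ fill_in_keys ∧ ∃ j ∈ List.range i, ((pvLookup data p.1).getD []).getD j "" ≠ ""
instance (data : List (String × List String)) (load_key_list : List String) (sav_key_list : List String) (fill_in_keys : List String) : Decidable (Pre_convert_csv_2_json data load_key_list sav_key_list fill_in_keys) := by unfold Pre_convert_csv_2_json; infer_instance

def pvWitness_convert_csv_2_json : (List (String × List String)) × List String × List String × List String :=
  ([("a", ["x", ""]), ("b", ["u", "v"])], ["a", "b"], ["k1", "k2"], ["a"])

def Spec_convert_csv_2_json (data : List (String × List String)) (load_key_list : List String) (sav_key_list : List String) (fill_in_keys : List String) (out : List (List (String × String))) : Prop := out = convert_csv_2_json_alt data load_key_list sav_key_list fill_in_keys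
instance (data : List (String × List String)) (load_key_list : List String) (sav_key_list : List String) (fill_in_keys : List String) (out : List (List (String × String))) : Decidable (Spec_convert_csv_2_json data load_key_list sav_key_list fill_in_keys out) := by unfold Spec_convert_csv_2_json; infer_instance

-- ===== CLAIM (what is proved, stated in full; the proofs are below) =====
def Claim_equal_convert_csv_2_json : Prop := ∀ (data : List (String × List String)) (load_key_list : List String) (sav_key_list : List String) (fill_in_keys : List String), Dom_convert_csv_2_json data load_key_list sav_key_list fill_in_keys → Pre_convert_csv_2_json data load_key_list sav_key_list fill_in_keys → Spec_convert_csv_2_json data load_key_list sav_key_list fill_in_keys (convert_csv_2_json data load_key_list sav_key_list fill_in_keys)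

-- ===== LEMMAS AND PROOFS =====

/-- the column of key `k` (total form; under Pre_ the lookup succeeds). -/
def pvColOf (data : List (String × List String)) (k : String) : List String :=
  (pvLookup data k).getD []

/-- last non-empty cell among the first `i` cells of a column (the forward-fill value). -/
def pvLast (col : List String) (i : Nat) : Option String :=
  (col.take i).foldl (fun a c => if c ≠ "" then some c else a) none

/-- the value both programs store at row `i` of a column. -/
def pvRowVal (col : List String) (i : Nat) : String :=
  if col.getD i "" ≠ "" then col.getD i "" else (pvLast col i).getD ""

/-- the dict both programs build for row `i`. -/
def pvRowDict (data : List (String × List String)) (pairs : List (String × String)) (i : Nat) :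
    PySem.Dict String String :=
  pairs.foldl (fun d p => d.insert p.2 (pvRowVal (pvColOf data p.1) i)) PySem.Dict.empty

lemma pvLast_zero (col : List String) : pvLast col 0 = none := rfl

lemma pvFoldl_last_eq_none (l : List String) (a : Option String) :
    l.foldl (fun a c => if c ≠ "" then some c else a) a = none ↔ a = none ∧ ∀ c ∈ l, c = "" := by
  induction l generalizing a with
  | nil => simp
  | cons x xs ih =>
    simp only [List.foldl_cons, ih, List.mem_cons]
    by_cases hx : x = "" <;> simp [hx]

lemma pvLast_succ (col : List String) (i : Nat) (h : i < col.length) :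
    pvLast col (i + 1) = if col.getD i "" ≠ "" then some (col.getD i "") else pvLast col i := by
  unfold pvLast
  rw [List.take_add_one, List.foldl_append, List.getElem?_eq_getElem h]
  simp [List.getD_eq_getElem?_getD, List.getElem?_eq_getElem h]

lemma pvLast_ne_none (col : List String) (i : Nat)
    (h : ∃ j ∈ List.range i, col.getD j "" ≠ "") : pvLast col i ≠ none := by
  intro hnone
  obtain ⟨j, hj, hne⟩ := h
  rw [List.mem_range] at hj
  rw [pvLast, pvFoldl_last_eq_none] at hnone
  have hjlen : j < col.length := by
    by_contra hge
    exact hne (List.getD_eq_default _ _ (by omega))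
  have : col[j] ∈ col.take i := by
    rw [List.mem_take_iff_getElem]
    exact ⟨j, by omega, rfl⟩
  have := hnone.2 _ this
  rw [List.getD_eq_getElem?_getD, List.getElem?_eq_getElem hjlen] at hne
  exact hne this

lemma pvStrPos (s : String) : (0 < PySem.Str.len s) ↔ s ≠ "" := by
  rw [PySem.Str.len_eq]
  constructor
  · intro h he; subst he; simp at h
  · intro h
    by_contra hle
    have : s.toList.length = 0 := by omega
    rw [List.length_eq_zero_iff] at this
    exact h (String.toList_eq_nil_iff.mp this)

-- fill_in_value initialisation
lemma pvFv0_get_of_not_mem (l : List String) (d : PySem.Dict String (Option String)) (k : String)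
    (h : k ∉ l) :
    (l.foldl (fun d k => d.insert k (none : Option String)) d).get? k = d.get? k := by
  induction l generalizing d with
  | nil => rfl
  | cons x xs ih =>
    simp only [List.mem_cons, not_or] at h
    rw [List.foldl_cons, ih _ h.2, PySem.Dict.get?_insert_of_ne _ _ h.1]

lemma pvFv0_get_of_mem (l : List String) (d : PySem.Dict String (Option String)) (k : String)
    (h : k ∈ l) :
    (l.foldl (fun d k => d.insert k (none : Option String)) d).get? k = some none := by
  induction l generalizing d with
  | nil => simp at h
  | cons x xs ih =>
    rw [List.foldl_cons]
    by_cases hx : k ∈ xs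
    · exact ih _ hx
    · have hk : k = x := by rcases List.mem_cons.mp h with h | h; exact h; exact absurd h hx
      subst hk
      rw [pvFv0_get_of_not_mem _ _ _ hx, PySem.Dict.get?_insert_self]

-- ===== A-side =====

lemma pvA_row_spec (data : List (String × List String)) (fill_in_keys : List String) (i : Nat) :
    ∀ (pairs' : List (String × String)) (fv : PySem.Dict String (Option String))
      (tmp : PySem.Dict String String),
    (∀ p ∈ pairs', ∃ col, pvLookup data p.1 = some col ∧ i < col.length ∧
        (col.getD i "" = "" → p.1 ∈ fill_in_keys ∧ pvLast col i ≠ none)) →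
    (∀ p ∈ pairs', (pvColOf data p.1).getD i "" = "" →
        fv.get? p.1 = some (pvLast (pvColOf data p.1) i)) →
    ∃ fv', pvA_row data fill_in_keys (i : Int) pairs' (fv, tmp)
        = some (fv', pairs'.foldl (fun d p => d.insert p.2 (pvRowVal (pvColOf data p.1) i)) tmp)
      ∧ ∀ k, fv'.get? k =
          if k ∈ fill_in_keys ∧ (∃ p ∈ pairs', p.1 = k) ∧ (pvColOf data k).getD i "" ≠ ""
          then some (some ((pvColOf data k).getD i ""))
          else fv.get? k := by
  intro pairs'
  induction pairs' with
  | nil =>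
    intro fv tmp _ _
    refine ⟨fv, by simp [pvA_row], fun k => ?_⟩
    rw [if_neg]
    rintro ⟨-, ⟨p, hp, -⟩, -⟩
    simp at hp
  | cons q rest ih =>
    intro fv tmp HPre Hfv
    obtain ⟨lk, sk⟩ := q
    obtain ⟨col, hcol, hi, hp⟩ := HPre (lk, sk) List.mem_cons_self
    have hcolOf : pvColOf data lk = col := by rw [pvColOf, hcol]; rfl
    have hgetD : col.getD i "" = col[i] := by
      rw [List.getD_eq_getElem?_getD, List.getElem?_eq_getElem hi]; rfl
    have hpy : PySem.List.pyGet? col (i : Int) = some col[i] := by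
      rw [PySem.List.pyGet?_natCast, List.getElem?_eq_getElem hi]
    by_cases hcell : col[i] = ""
    · -- empty cell: read the fill value
      obtain ⟨hfk, hlast⟩ := hp (by rw [hgetD]; exact hcell)
      have hread : fv.get? lk = some (pvLast col i) := by
        have := Hfv (lk, sk) List.mem_cons_self (by rw [hcolOf, hgetD]; exact hcell)
        rwa [hcolOf] at this
      obtain ⟨v, hv⟩ := Option.ne_none_iff_exists'.mp hlast
      have hrow : pvRowVal col i = v := by
        rw [pvRowVal, hgetD, if_neg (by simp [hcell]), hv]; rfl
      obtain ⟨fv', heq, hchar⟩ := ih fv (tmp.insert sk v)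
        (fun p hq => HPre p (List.mem_cons_of_mem _ hq))
        (fun p hq => Hfv p (List.mem_cons_of_mem _ hq))
      refine ⟨fv', ?_, ?_⟩
      · simp only [pvA_row, hcol, hpy]
        rw [if_neg (fun h => (pvStrPos _).mp h hcell), hread, hv]
        show pvA_row data fill_in_keys (i : Int) rest (fv, tmp.insert sk v) = _
        rw [heq, List.foldl_cons]
        simp [hcolOf, hrow]
      · intro k
        rw [hchar k]
        refine if_congr ⟨fun h => ⟨h.1, ⟨h.2.1.choose, List.mem_cons_of_mem _ h.2.1.choose_spec.1, h.2.1.choose_spec.2⟩, h.2.2⟩, fun h => ?_⟩ rfl rfl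
        obtain ⟨h1, ⟨p, hpmem, hpk⟩, h3⟩ := h
        rcases List.mem_cons.mp hpmem with hph | hpt
        · exfalso
          apply h3
          rw [← hpk, hph, hcolOf, hgetD]
          exact hcell
        · exact ⟨h1, ⟨p, hpt, hpk⟩, h3⟩
    · -- non-empty cell: store it and maybe update the fill dict
      have hrow : pvRowVal col i = col[i] := by
        rw [pvRowVal, hgetD, if_pos (by simp [hcell])]
      have hfv1 : ∀ p ∈ rest, (pvColOf data p.1).getD i "" = "" →
          (if fill_in_keys.contains lk then fv.insert lk (some col[i]) else fv).get? p.1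
            = some (pvLast (pvColOf data p.1) i) := by
        intro p hpmem hpe
        by_cases hpk : p.1 = lk
        · exfalso
          rw [hpk, hcolOf, hgetD] at hpe
          exact hcell hpe
        · by_cases hc : fill_in_keys.contains lk
          · rw [if_pos hc, PySem.Dict.get?_insert_of_ne _ _ hpk]
            exact Hfv p (List.mem_cons_of_mem _ hpmem) hpe
          · rw [if_neg hc]
            exact Hfv p (List.mem_cons_of_mem _ hpmem) hpe
      obtain ⟨fv'', heq, hchar⟩ := ih
        (if fill_in_keys.contains lk then fv.insert lk (some col[i]) else fv)
        (tmp.insert sk col[i])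
        (fun p hq => HPre p (List.mem_cons_of_mem _ hq)) hfv1
      refine ⟨fv'', ?_, ?_⟩
      · simp only [pvA_row, hcol, hpy]
        rw [if_pos ((pvStrPos _).mpr hcell), heq, List.foldl_cons]
        simp [hcolOf, hrow]
      · intro k
        rw [hchar k]
        by_cases hr : k ∈ fill_in_keys ∧ (∃ p ∈ rest, p.1 = k) ∧ (pvColOf data k).getD i "" ≠ ""
        · have hcond : k ∈ fill_in_keys ∧ (∃ p ∈ (lk, sk) :: rest, p.1 = k) ∧ (pvColOf data k).getD i "" ≠ "" :=
            ⟨hr.1, ⟨hr.2.1.choose, List.mem_cons_of_mem _ hr.2.1.choose_spec.1, hr.2.1.choose_spec.2⟩, hr.2.2⟩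
          rw [if_pos hr, if_pos hcond]
        · rw [if_neg hr]
          by_cases hk : k = lk
          · subst hk
            have hck : (pvColOf data k).getD i "" = col[i] := by rw [hcolOf, hgetD]
            by_cases hkf : k ∈ fill_in_keys
            · have hcond : k ∈ fill_in_keys ∧ (∃ p ∈ (k, sk) :: rest, p.1 = k) ∧ (pvColOf data k).getD i "" ≠ "" :=
                ⟨hkf, ⟨(k, sk), List.mem_cons_self, rfl⟩, by rw [hck]; exact hcell⟩
              rw [if_pos hcond, if_pos (show fill_in_keys.contains k = true by simpa using hkf),
                PySem.Dict.get?_insert_self, hck]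
            · have hcont : ¬ fill_in_keys.contains k = true := by simpa using hkf
              rw [if_neg hcont, if_neg (fun h => hkf h.1)]
          · have hfv1k : (if fill_in_keys.contains lk then fv.insert lk (some col[i]) else fv).get? k = fv.get? k := by
              by_cases hc : fill_in_keys.contains lk
              · rw [if_pos hc, PySem.Dict.get?_insert_of_ne _ _ hk]
              · rw [if_neg hc]
            rw [hfv1k, if_neg]
            rintro ⟨h1, ⟨p, hpmem, hpk⟩, h3⟩
            rcases List.mem_cons.mp hpmem with hph | hpt
            · exact hk (by rw [← hpk, hph])
            · exact hr ⟨h1, ⟨p, hpt, hpk⟩, h3⟩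

lemma pvA_rows_spec (data : List (String × List String)) (fill_in_keys : List String)
    (pairs : List (String × String)) (num : Nat)
    (HPre : ∀ p ∈ pairs, ∃ col, pvLookup data p.1 = some col ∧ num ≤ col.length ∧
        ∀ j, j < num → col.getD j "" = "" → p.1 ∈ fill_in_keys ∧ pvLast col j ≠ none) :
    ∀ (cnt i : Nat) (fv : PySem.Dict String (Option String))
      (acc : List (List (String × String))),
    i + cnt = num →
    (∀ p ∈ pairs, p.1 ∈ fill_in_keys → fv.get? p.1 = some (pvLast (pvColOf data p.1) i)) →
    pvA_rows data fill_in_keys pairs (PySem.List.pyRange (i : Int) (num : Int) 1) fv acc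
      = some (acc ++ (List.range' i cnt).map (fun t => (pvRowDict data pairs t).items)) := by
  intro cnt
  induction cnt with
  | zero =>
    intro i fv acc hi _
    have hieq : i = num := by omega
    subst hieq
    rw [PySem.List.pyRange_one_eq_nil (le_refl _)]
    simp [pvA_rows, List.range']
  | succ cnt ihc =>
    intro i fv acc hi Hfv
    have hilt : i < num := by omega
    rw [PySem.List.pyRange_one_cons (by exact_mod_cast hilt)]
    obtain ⟨fv', heq, hchar⟩ := pvA_row_spec data fill_in_keys i pairs fv PySem.Dict.empty
      (fun p hp => by
        obtain ⟨col, hcol, hlen, hAll⟩ := HPre p hp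
        exact ⟨col, hcol, by omega, fun hc => hAll i hilt hc⟩)
      (fun p hp hpe => by
        obtain ⟨col, hcol, hlen, hAll⟩ := HPre p hp
        have hcolOf : pvColOf data p.1 = col := by rw [pvColOf, hcol]; rfl
        rw [hcolOf] at hpe
        exact Hfv p hp (hAll i hilt hpe).1)
    simp only [pvA_rows, heq]
    have hfv' : ∀ p ∈ pairs, p.1 ∈ fill_in_keys →
        fv'.get? p.1 = some (pvLast (pvColOf data p.1) (i + 1)) := by
      intro p hp hpf
      obtain ⟨col, hcol, hlen, hAll⟩ := HPre p hp
      have hcolOf : pvColOf data p.1 = col := by rw [pvColOf, hcol]; rfl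
      have hic : i < col.length := by omega
      rw [hchar p.1]
      by_cases hce : col.getD i "" = ""
      · rw [if_neg (fun h => h.2.2 (by rw [hcolOf]; exact hce))]
        rw [Hfv p hp hpf, hcolOf, pvLast_succ col i hic, if_neg (fun h => h hce)]
      · rw [if_pos ⟨hpf, ⟨p, hp, rfl⟩, by rw [hcolOf]; exact hce⟩]
        rw [hcolOf, pvLast_succ col i hic, if_pos hce]
    have hstep := ihc (i + 1) fv' (acc ++ [(pvRowDict data pairs i).items]) (by omega) hfv'
    have hpush : (i : Int) + 1 = ((i + 1 : Nat) : Int) := by push_cast; ring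
    rw [hpush, pvRowDict] at *
    rw [hstep, List.range'_succ, List.map_cons]
    simp [pvRowDict]

-- ===== B-side =====

lemma pvB_col_spec (fillk : Bool) (sk : String) (col : List String)
    (g : Nat → PySem.Dict String String) :
    ∀ (k j : Nat) (carry : Option String),
    j + k ≤ col.length →
    (∀ i, j ≤ i → i < j + k → col.getD i "" = "" → fillk = true ∧ pvLast col i ≠ none) →
    (fillk = true → carry = pvLast col j) →
    pvB_col fillk sk ((List.range' j k).map g) (col.drop j) carry
      = some ((List.range' j k).map (fun i => (g i).insert sk (pvRowVal col i))) := by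
  intro k
  induction k with
  | zero => intro j carry _ _ _; simp [pvB_col, List.range']
  | succ k ih =>
    intro j carry hlen H hcarry
    have hj : j < col.length := by omega
    have hdrop : col.drop j = col[j] :: col.drop (j + 1) := List.drop_eq_getElem_cons hj
    have hgetD : col.getD j "" = col[j] := by
      rw [List.getD_eq_getElem?_getD, List.getElem?_eq_getElem hj]; rfl
    rw [List.range'_succ, List.map_cons, List.map_cons, hdrop]
    by_cases hcell : col[j] = ""
    · simp only [pvB_col, hcell, ne_eq, not_true_eq_false, if_false]
      obtain ⟨hf, hlast⟩ := H j (Nat.le_refl j) (by omega) (by rw [hgetD]; exact hcell)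
      obtain ⟨v, hv⟩ := Option.ne_none_iff_exists'.mp hlast
      rw [hcarry hf, hv]
      have hrec := ih (j + 1) (pvLast col j)
        (by omega)
        (fun i h1 h2 => H i (by omega) (by omega))
        (fun _ => by rw [pvLast_succ col j hj, hgetD, if_neg (by simp [hcell])])
      rw [hv] at hrec
      rw [hrec]
      have : pvRowVal col j = v := by
        rw [pvRowVal, hgetD, if_neg (by simp [hcell]), hv]; rfl
      rw [this]
    · simp only [pvB_col, hcell, ne_eq, not_false_eq_true, if_true]
      have hrec := ih (j + 1) (if fillk then some col[j] else carry)
        (by omega)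
        (fun i h1 h2 => H i (by omega) (by omega))
        (fun hf => by
          rw [pvLast_succ col j hj, hgetD, hf]; simp [hcell])
      rw [hrec]
      have : pvRowVal col j = col[j] := by
        rw [pvRowVal, hgetD, if_pos (by simp [hcell])]
      rw [this]

lemma pvB_cols_spec (data : List (String × List String)) (fill_in_keys : List String) (num : Nat) :
    ∀ (pairs' : List (String × String)) (g : Nat → PySem.Dict String String),
    (∀ p ∈ pairs', ∃ col, pvLookup data p.1 = some col ∧ num ≤ col.length ∧
        ∀ j, j < num → col.getD j "" = "" → p.1 ∈ fill_in_keys ∧ pvLast col j ≠ none) →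
    pvB_cols data fill_in_keys pairs' ((List.range num).map g)
      = some ((List.range num).map
          (fun i => pairs'.foldl (fun d p => d.insert p.2 (pvRowVal (pvColOf data p.1) i)) (g i))) := by
  intro pairs'
  induction pairs' with
  | nil => intro g _; simp [pvB_cols]
  | cons p rest ih =>
    intro g HPre
    obtain ⟨lk, sk⟩ := p
    obtain ⟨col, hcol, hlen, hp⟩ := HPre (lk, sk) List.mem_cons_self
    have hcolOf : pvColOf data lk = col := by rw [pvColOf, hcol]; rfl
    have hB := pvB_col_spec (fill_in_keys.contains lk) sk col g num 0 none
      (by omega)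
      (fun i h0 hi hcell => by
        obtain ⟨hf, hlast⟩ := hp i (by omega) hcell
        exact ⟨by simpa using hf, hlast⟩)
      (fun _ => rfl)
    rw [List.drop_zero, ← List.range_eq_range'] at hB
    simp only [pvB_cols, hcol, hB]
    have hih := ih (fun i => (g i).insert sk (pvRowVal col i))
      (fun q hq => HPre q (List.mem_cons_of_mem _ hq))
    rw [hih]
    simp [hcolOf]

-- ===== VERDICT (by name: the statement is the Claim_ definition above) =====
theorem convert_csv_2_json_spec : Claim_equal_convert_csv_2_json := by
  intro data load_key_list sav_key_list fill_in_keys _ hpre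
  unfold Spec_convert_csv_2_json
  obtain ⟨hne, hsome0, hpairs⟩ := hpre
  cases load_key_list with
  | nil => exact absurd rfl hne
  | cons k0 lt =>
    have hI : (k0 :: lt).headI = k0 := rfl
    rw [hI] at hsome0 hpairs
    obtain ⟨col0, hcol0⟩ := Option.isSome_iff_exists.mp hsome0
    have hget0 : PySem.List.pyGet? (k0 :: lt) (0 : Int) = some k0 :=
      PySem.List.pyGet?_zero_cons k0 lt
    have HP : ∀ p ∈ (k0 :: lt).zip sav_key_list, ∃ col, pvLookup data p.1 = some col ∧
        col0.length ≤ col.length ∧ ∀ j, j < col0.length → col.getD j "" = "" →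
          p.1 ∈ fill_in_keys ∧ pvLast col j ≠ none := by
      intro p hp
      obtain ⟨h1, h2, h3⟩ := hpairs p hp
      obtain ⟨col, hcol⟩ := Option.isSome_iff_exists.mp h1
      rw [hcol0, hcol] at h2 h3
      refine ⟨col, hcol, by simpa using h2, ?_⟩
      intro j hj hc
      obtain ⟨hm, hex⟩ := h3 j (by simpa using List.mem_range.mpr hj) (by simpa using hc)
      exact ⟨hm, pvLast_ne_none col j (by simpa using hex)⟩
    have hfv0 : ∀ p ∈ (k0 :: lt).zip sav_key_list, p.1 ∈ fill_in_keys →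
        (fill_in_keys.foldl (fun d k => d.insert k (none : Option String)) PySem.Dict.empty).get? p.1
          = some (pvLast (pvColOf data p.1) 0) := by
      intro p _ hpf
      rw [pvFv0_get_of_mem _ _ _ hpf, pvLast_zero]
    have hA := pvA_rows_spec data fill_in_keys ((k0 :: lt).zip sav_key_list) col0.length HP
      col0.length 0 (fill_in_keys.foldl (fun d k => d.insert k (none : Option String)) PySem.Dict.empty)
      [] (by omega) hfv0
    have hB := pvB_cols_spec data fill_in_keys col0.length ((k0 :: lt).zip sav_key_list)
      (fun _ => PySem.Dict.empty) HP
    have hrep : (List.range col0.length).map (fun _ => (PySem.Dict.empty : PySem.Dict String String))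
        = List.replicate col0.length PySem.Dict.empty := by
      simp [List.map_const']
    rw [hrep] at hB
    rw [Nat.cast_zero] at hA
    unfold convert_csv_2_json convert_csv_2_json_alt
    rw [hget0]
    simp only [hcol0, hA, hB]
    simp [pvRowDict, List.range_eq_range']
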